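-- pv_equiv track=rewrite | github.com/gabriel-piedade95/Pesquisa_em_Biologia | calculos_estados.py | bacias
-- ===== SOURCE A (Python) =====
-- def bacias_arvores(lista, raiz):
--
-- 	if raiz not in lista:
-- 		return [raiz]
--
-- 	aux = [raiz]
-- 	for i in range(0, len(lista)):
-- 		if lista[i] == raiz and i not in aux:
-- 			aux += bacias_arvores(lista, i)
--
-- 	return aux
--
-- def bacias(lista):
--
--   bacia = {}
--   a = 0
--   for i in range(0, len(lista)):
--     if lista[i] == i:
--       bacia[a] = bacias_arvores(lista, i)
--       a += 1
--
--   return bacia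
-- ===== SOURCE B (Python) =====
-- def bacias(lista):
--     # Build the children adjacency once (skip self-loops: those are the roots),
--     # then DFS from each root in ascending order -- no per-node rescans of lista.
--     children = {}
--     for i, p in enumerate(lista):
--         if p != i:
--             children.setdefault(p, []).append(i)
--
--     def dfs(v):
--         comp = [v]
--         for c in children.get(v, []):
--             comp += dfs(c)
--         return comp
--
--     roots = [i for i in range(len(lista)) if lista[i] == i]
--     return {a: dfs(r) for a, r in enumerate(roots)}
-- ===== Notes on version B (the rewrite author's own statement) =====
-- stated objective: alternative
-- what changed: B precomputes a children adjacency dict in one pass and does a plain DFS from each root, replacing A's recursion that rescans the whole list at every visited node ('in lista', the full-range scan and the 'i not in aux' membership test).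
import Mathlib
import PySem

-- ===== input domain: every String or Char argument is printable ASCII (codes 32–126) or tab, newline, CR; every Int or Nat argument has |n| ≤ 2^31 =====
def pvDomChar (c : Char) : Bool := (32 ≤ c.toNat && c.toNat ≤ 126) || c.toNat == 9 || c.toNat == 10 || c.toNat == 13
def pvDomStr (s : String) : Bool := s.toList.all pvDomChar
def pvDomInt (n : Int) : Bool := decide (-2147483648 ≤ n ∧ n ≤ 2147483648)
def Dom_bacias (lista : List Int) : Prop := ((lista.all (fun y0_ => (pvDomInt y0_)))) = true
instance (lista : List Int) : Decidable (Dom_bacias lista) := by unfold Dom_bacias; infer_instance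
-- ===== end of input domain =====

-- B replaces A's per-node rescans of lista and list-membership guards by a
-- children adjacency dict built once plus a plain DFS from each root
-- (objective: alternative algorithm; not measured faster on generated inputs).

-- ===== PORT A =====
-- Python A's recursion depth is bounded by lista.length (parent pointers form a
-- function, so call chains out of a self-parent root never repeat a node); the
-- fuel argument only makes that recursion structural; `bacias` starts it at
-- lista.length, which those call chains never exhaust.
def bacias_arvores (lista : List Int) (raiz : Int) : Nat → List Int
  | 0 => [raiz]
  | fuel+1 =>
    if lista.contains raiz = false then [raiz]
    else
      (PySem.List.pyRange 0 (PySem.List.len lista) 1).foldl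
        (fun aux i =>
          if PySem.List.pyGetD lista i 0 == raiz && !(aux.contains i) then
            aux ++ bacias_arvores lista i fuel
          else aux)
        [raiz]

def bacias (lista : List Int) : List (Int × List Int) :=
  ((PySem.List.pyRange 0 (PySem.List.len lista) 1).foldl
    (fun (st : PySem.Dict Int (List Int) × Int) i =>
      if PySem.List.pyGetD lista i 0 == i then
        (st.1.insert st.2 (bacias_arvores lista i lista.length), st.2 + 1)
      else st)
    (PySem.Dict.empty, 0)).1.items

-- ===== PORT B =====
-- children.setdefault(p, []).append(i) over the self-loop-free edges, i.e.
-- children[p] becomes children.get(p, []) ++ [i] (PySem.Dict.modify is exactly that)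
def childrenDict (lista : List Int) : PySem.Dict Int (List Int) :=
  (((PySem.List.enumerate lista 0).filter (fun q => q.2 != q.1)).map
      (fun q => (q.2, q.1))).foldl
    (fun d q => d.modify q.1 [] (· ++ [q.2])) PySem.Dict.empty

-- the recursive dfs of Source B; same depth-fuel bound as A's recursion
def dfsB (children : PySem.Dict Int (List Int)) : Int → Nat → List Int
  | v, 0 => [v]
  | v, fuel+1 =>
    (children.getD v []).foldl (fun comp c => comp ++ dfsB children c fuel) [v]

def bacias_alt (lista : List Int) : List (Int × List Int) :=
  let children := childrenDict lista
  let roots := (PySem.List.pyRange 0 (PySem.List.len lista) 1).filter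
      (fun i => PySem.List.pyGetD lista i 0 == i)
  (PySem.List.enumerate roots 0).map (fun q => (q.1, dfsB children q.2 lista.length))

-- ===== PRECONDITION & SPEC =====
def Spec_bacias (lista : List Int) (out : List (Int × List Int)) : Prop := out = bacias_alt lista
instance (lista : List Int) (out : List (Int × List Int)) : Decidable (Spec_bacias lista out) := by unfold Spec_bacias; infer_instance

-- ===== CLAIM (what is proved, stated in full; the proofs are below) =====
def Claim_equal_bacias : Prop := ∀ (lista : List Int), Dom_bacias lista → Spec_bacias lista (bacias lista)

-- ===== LEMMAS AND PROOFS =====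

-- parent function: pa lista x = lista[x] on valid indices (the default never matters there)
def pa (lista : List Int) (x : Int) : Int := PySem.List.pyGetD lista x x

-- x's parent chain eventually reaches a fixed point of pa
def Rooted (lista : List Int) (v : Int) : Prop :=
  ∃ m, pa lista ((pa lista)^[m] v) = (pa lista)^[m] v

-- the ascending list of proper children of v
def kids (lista : List Int) (v : Int) : List Int :=
  (PySem.List.pyRange 0 (PySem.List.len lista) 1).filter
    (fun i => PySem.List.pyGetD lista i 0 == v && i != v)

theorem pa_eq_pyGetD (lista : List Int) (i : Int) (h0 : 0 ≤ i)
    (h1 : i < PySem.List.len lista) : pa lista i = PySem.List.pyGetD lista i 0 := by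
  simp only [PySem.List.len_eq] at h1
  rw [pa, PySem.List.pyGetD_eq_getElem lista i h0 h1,
    PySem.List.pyGetD_eq_getElem lista 0 h0 h1]

theorem kids_sound (lista : List Int) (v i : Int) (h : i ∈ kids lista v) :
    pa lista i = v ∧ i ≠ v ∧ 0 ≤ i ∧ i < PySem.List.len lista := by
  rw [kids, List.mem_filter] at h
  obtain ⟨hmem, hpred⟩ := h
  rw [PySem.List.mem_pyRange_one] at hmem
  simp only [Bool.and_eq_true, beq_iff_eq, bne_iff_ne] at hpred
  exact ⟨(pa_eq_pyGetD lista i hmem.1 hmem.2).trans hpred.1, hpred.2, hmem.1, hmem.2⟩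

theorem childrenDict_getD (lista : List Int) (v : Int) :
    (childrenDict lista).getD v [] = kids lista v := by
  rw [childrenDict, PySem.Dict.getD_foldl_modify_append,
    PySem.List.enumerate_eq_map_pyRange (d := 0), kids]
  simp only [List.filter_map, List.map_map, Function.comp_def, List.filter_filter,
    PySem.Dict.getD_empty, List.nil_append]
  rw [show (fun j : Int => j) = id from rfl, List.map_id]
  apply List.filter_congr
  intro j hj
  by_cases h1 : PySem.List.pyGetD lista j 0 = v
  · rw [h1]
    by_cases h2 : j = v
    · rw [h2]
    · have hvj : (v != j) = true := by simp [bne_iff_ne]; exact fun h => h2 h.symm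
      have hjv : (j != v) = true := by simp [bne_iff_ne, h2]
      rw [hvj, hjv]
  · have hb : (PySem.List.pyGetD lista j 0 == v) = false := by simpa using h1
    rw [hb, Bool.false_and, Bool.false_and]

theorem dfsB_succ (lista : List Int) (v : Int) (f : Nat) :
    dfsB (childrenDict lista) v (f+1)
      = v :: (kids lista v).flatMap (fun c => dfsB (childrenDict lista) c f) := by
  rw [dfsB, childrenDict_getD, PySem.List.foldl_append_eq_flatMap, List.singleton_append]

theorem mem_dfsB (lista : List Int) (f : Nat) (v x : Int)
    (h : x ∈ dfsB (childrenDict lista) v f) : ∃ k, (pa lista)^[k] x = v := by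
  induction f generalizing v with
  | zero =>
    refine ⟨0, ?_⟩
    simp only [dfsB, List.mem_singleton] at h
    exact h
  | succ f ih =>
    rw [dfsB_succ, List.mem_cons] at h
    rcases h with h | h
    · exact ⟨0, h⟩
    · rw [List.mem_flatMap] at h
      obtain ⟨c, hc, hx⟩ := h
      obtain ⟨k, hk⟩ := ih c hx
      exact ⟨k + 1, by rw [Function.iterate_succ_apply', hk, (kids_sound lista v c hc).1]⟩

theorem periodic_fixed (lista : List Int) (v : Int) (k : Nat) (hk : 0 < k)
    (hcyc : (pa lista)^[k] v = v) (hr : Rooted lista v) : pa lista v = v := by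
  obtain ⟨m, hm⟩ := hr
  have hmul : ∀ c : Nat, (pa lista)^[k * c] v = v := by
    intro c
    rw [Function.iterate_mul]
    exact Function.iterate_fixed hcyc c
  have hge : m ≤ k * (m + 1) := by nlinarith
  obtain ⟨t, ht⟩ := Nat.exists_eq_add_of_le hge
  have hfix : ∀ s : Nat, (pa lista)^[s] ((pa lista)^[m] v) = (pa lista)^[m] v :=
    fun s => Function.iterate_fixed hm s
  have hv : v = (pa lista)^[m] v := by
    have := hmul (m + 1)
    rw [ht, Nat.add_comm m t, Function.iterate_add_apply, hfix t] at this
    exact this.symm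
  calc pa lista v = pa lista ((pa lista)^[m] v) := by rw [← hv]
    _ = (pa lista)^[m] v := hm
    _ = v := hv.symm

theorem rooted_of_parent (lista : List Int) (c v : Int) (hpc : pa lista c = v)
    (hr : Rooted lista v) : Rooted lista c := by
  obtain ⟨m, hm⟩ := hr
  exact ⟨m + 1, by rw [Function.iterate_succ_apply, hpc]; exact hm⟩

-- a later sibling i never already lies in an earlier sibling's basin
theorem not_mem_dfs_sibling (lista : List Int) (v i c : Int) (f : Nat)
    (hr : Rooted lista v) (hpi : pa lista i = v) (hic : i ≠ c)
    (hpc : pa lista c = v) (hcv : c ≠ v)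
    (hmem : i ∈ dfsB (childrenDict lista) c f) : False := by
  obtain ⟨k, hk⟩ := mem_dfsB lista f c i hmem
  cases k with
  | zero => exact hic hk
  | succ s =>
    rw [Function.iterate_succ_apply, hpi] at hk
    have hper : (pa lista)^[s + 1] v = v := by
      rw [Function.iterate_succ_apply', hk, hpc]
    have hfix : pa lista v = v := periodic_fixed lista v (s + 1) (Nat.succ_pos s) hper hr
    rw [Function.iterate_fixed hfix s] at hk
    exact hcv hk.symm

theorem fold_inv (lista : List Int) (f : Nat) (v : Int) (hr : Rooted lista v)
    (ih : ∀ w, Rooted lista w →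
      bacias_arvores lista w f = dfsB (childrenDict lista) w f) :
    ∀ (l cs : List Int), l.Nodup →
    (∀ c ∈ cs, pa lista c = v ∧ c ≠ v) →
    (∀ i ∈ l, i ∉ cs) →
    (∀ i ∈ l, 0 ≤ i ∧ i < PySem.List.len lista) →
    l.foldl
        (fun aux i =>
          if PySem.List.pyGetD lista i 0 == v && !(aux.contains i) then
            aux ++ bacias_arvores lista i f
          else aux)
        (v :: cs.flatMap (fun c => dfsB (childrenDict lista) c f))
      = v :: (cs ++ l.filter (fun i => PySem.List.pyGetD lista i 0 == v && i != v)).flatMap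
          (fun c => dfsB (childrenDict lista) c f) := by
  intro l
  induction l with
  | nil => intro cs _ _ _ _; simp
  | cons i l ihl =>
    intro cs hnd hcs hdisj hbnd
    obtain ⟨hil, hndl⟩ := List.nodup_cons.mp hnd
    obtain ⟨hi0, hi1⟩ := hbnd i (List.mem_cons_self ..)
    rw [List.foldl_cons, List.filter_cons]
    by_cases hgi : PySem.List.pyGetD lista i 0 = v
    · have hpi : pa lista i = v := (pa_eq_pyGetD lista i hi0 hi1).trans hgi
      by_cases hiv : i = v
      · have hguard :
            (PySem.List.pyGetD lista i 0 == v &&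
              !((v :: cs.flatMap (fun c => dfsB (childrenDict lista) c f)).contains i)) = false := by
          rw [hiv]; simp
        have hpred : (PySem.List.pyGetD lista i 0 == v && i != v) = false := by
          rw [hiv]; simp
        rw [hguard, hpred]
        simp only [Bool.false_eq_true, if_false]
        exact ihl cs hndl hcs (fun j hj => hdisj j (List.mem_cons_of_mem _ hj))
          (fun j hj => hbnd j (List.mem_cons_of_mem _ hj))
      · have hnotmem :
            i ∉ (v :: cs.flatMap (fun c => dfsB (childrenDict lista) c f)) := by
          intro hmem
          rcases List.mem_cons.mp hmem with h | h
          · exact hiv h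
          · obtain ⟨c, hc, hxc⟩ := List.mem_flatMap.mp h
            exact not_mem_dfs_sibling lista v i c f hr hpi
              (fun h' => hdisj i (List.mem_cons_self ..) (h' ▸ hc))
              (hcs c hc).1 (hcs c hc).2 hxc
        have hguard :
            (PySem.List.pyGetD lista i 0 == v &&
              !((v :: cs.flatMap (fun c => dfsB (childrenDict lista) c f)).contains i)) = true := by
          simp only [Bool.and_eq_true, beq_iff_eq, Bool.not_eq_true']
          exact ⟨hgi, by simpa using hnotmem⟩
        have hpred : (PySem.List.pyGetD lista i 0 == v && i != v) = true := by
          simp only [Bool.and_eq_true, beq_iff_eq, bne_iff_ne]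
          exact ⟨hgi, hiv⟩
        rw [hguard, hpred]
        simp only [if_true]
        rw [ih i (rooted_of_parent lista i v hpi hr)]
        have hstep :
            (v :: cs.flatMap (fun c => dfsB (childrenDict lista) c f))
                ++ dfsB (childrenDict lista) i f
              = v :: (cs ++ [i]).flatMap (fun c => dfsB (childrenDict lista) c f) := by
          simp
        rw [hstep, ihl (cs ++ [i]) hndl
          (by intro c hc
              rcases List.mem_append.mp hc with h | h
              · exact hcs c h
              · rw [List.mem_singleton.mp h]; exact ⟨hpi, hiv⟩)
          (by intro j hj hmem
              rcases List.mem_append.mp hmem with h | h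
              · exact hdisj j (List.mem_cons_of_mem _ hj) h
              · exact hil (List.mem_singleton.mp h ▸ hj))
          (fun j hj => hbnd j (List.mem_cons_of_mem _ hj))]
        simp
    · have hguard :
          (PySem.List.pyGetD lista i 0 == v &&
            !((v :: cs.flatMap (fun c => dfsB (childrenDict lista) c f)).contains i)) = false := by
        have : (PySem.List.pyGetD lista i 0 == v) = false := by simpa using hgi
        rw [this, Bool.false_and]
      have hpred : (PySem.List.pyGetD lista i 0 == v && i != v) = false := by
        have : (PySem.List.pyGetD lista i 0 == v) = false := by simpa using hgi
        rw [this, Bool.false_and]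
      rw [hguard, hpred]
      simp only [Bool.false_eq_true, if_false]
      exact ihl cs hndl hcs (fun j hj => hdisj j (List.mem_cons_of_mem _ hj))
        (fun j hj => hbnd j (List.mem_cons_of_mem _ hj))

theorem kids_of_not_contains (lista : List Int) (v : Int)
    (h : lista.contains v = false) : kids lista v = [] := by
  rw [kids, List.filter_eq_nil_iff]
  intro i hi
  rw [PySem.List.mem_pyRange_one] at hi
  simp only [Bool.and_eq_true, beq_iff_eq, bne_iff_ne, not_and]
  intro hgi
  exfalso
  have : PySem.List.pyGetD lista i 0 ∈ lista := by
    rw [PySem.List.pyGetD_eq_getElem lista 0 hi.1 (by simpa using hi.2)]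
    exact List.getElem_mem _
  rw [hgi] at this
  simp [List.contains_eq_mem] at h
  exact h this

theorem main_eq (lista : List Int) (f : Nat) (v : Int) (hr : Rooted lista v) :
    bacias_arvores lista v f = dfsB (childrenDict lista) v f := by
  induction f generalizing v with
  | zero => rfl
  | succ f ih =>
    by_cases hc : lista.contains v = false
    · rw [bacias_arvores, if_pos hc, dfsB_succ, kids_of_not_contains lista v hc,
        List.flatMap_nil]
    · rw [bacias_arvores, if_neg hc]
      have := fold_inv lista f v hr ih (PySem.List.pyRange 0 (PySem.List.len lista) 1) []
        (PySem.List.nodup_pyRange_one 0 (PySem.List.len lista))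
        (by intro c hc; simp at hc)
        (by intro i _ hmem; simp at hmem)
        (by intro i hi; exact (PySem.List.mem_pyRange_one.mp hi))
      simpa [dfsB_succ, kids] using this

theorem dict_fold (lista : List Int) (g : Int → List Int) :
    ∀ (l : List Int) (d : PySem.Dict Int (List Int)) (a : Int),
    (∀ k, d.contains k = true → k < a) →
    ((l.foldl
        (fun (st : PySem.Dict Int (List Int) × Int) i =>
          if PySem.List.pyGetD lista i 0 == i then (st.1.insert st.2 (g i), st.2 + 1)
          else st)
        (d, a)).1).items
      = d.items ++ (PySem.List.enumerate
          (l.filter (fun i => PySem.List.pyGetD lista i 0 == i)) a).map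
            (fun q => (q.1, g q.2)) := by
  intro l
  induction l with
  | nil => intro d a _; simp
  | cons i l ihl =>
    intro d a hfresh
    rw [List.foldl_cons, List.filter_cons]
    by_cases hgi : PySem.List.pyGetD lista i 0 = i
    · have hna : d.contains a = false := by
        cases h : d.contains a
        · rfl
        · exact absurd (hfresh a h) (lt_irrefl a)
      simp only [hgi, beq_self_eq_true, if_true]
      rw [ihl (d.insert a (g i)) (a + 1)
        (by intro k hk
            rw [PySem.Dict.contains_insert] at hk
            rcases Bool.or_eq_true_iff.mp hk with h | h
            · rw [beq_iff_eq.mp h]; omega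
            · exact lt_trans (hfresh k h) (by omega)),
        PySem.Dict.items_insert_of_not_contains _ _ hna,
        PySem.List.enumerate_cons]
      simp
    · have hguard : (PySem.List.pyGetD lista i 0 == i) = false := by simpa using hgi
      simp only [hguard]
      exact ihl d a hfresh

-- ===== VERDICT (by name: the statement is the Claim_ definition above) =====
theorem bacias_spec : Claim_equal_bacias := by
  intro lista _
  rw [Spec_bacias, bacias, bacias_alt]
  have hcong := PySem.List.foldl_congr_mem
    (PySem.List.pyRange 0 (PySem.List.len lista) 1)
    (fun (st : PySem.Dict Int (List Int) × Int) i =>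
      if PySem.List.pyGetD lista i 0 == i then
        (st.1.insert st.2 (bacias_arvores lista i lista.length), st.2 + 1)
      else st)
    (fun (st : PySem.Dict Int (List Int) × Int) i =>
      if PySem.List.pyGetD lista i 0 == i then
        (st.1.insert st.2 (dfsB (childrenDict lista) i lista.length), st.2 + 1)
      else st)
    (PySem.Dict.empty, 0)
    (by
      intro st i hi
      dsimp only
      by_cases hgi : PySem.List.pyGetD lista i 0 = i
      · have hbnd := PySem.List.mem_pyRange_one.mp hi
        have hroot : pa lista i = i := (pa_eq_pyGetD lista i hbnd.1 hbnd.2).trans hgi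
        rw [main_eq lista lista.length i ⟨0, hroot⟩]
      · have hguard : (PySem.List.pyGetD lista i 0 == i) = false := by simpa using hgi
        rw [hguard]
        rfl)
  rw [hcong, dict_fold lista (fun i => dfsB (childrenDict lista) i lista.length)
    (PySem.List.pyRange 0 (PySem.List.len lista) 1) PySem.Dict.empty 0
    (by intro k hk; rw [PySem.Dict.contains_empty] at hk; exact absurd hk (by simp))]
  simp
  rfl
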